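-- pv_equiv track=rewrite | github.com/williamhallatt/cogworks | tests/datasets/efficacy-benchmark/task-001-api-synthesis/verify.py | check_authentication
-- ===== SOURCE A (Python) =====
-- def check_authentication(content: str) -> bool:
--     """Check if authentication logic is present."""
--     indicators = [
--         "bcrypt",
--         "hash",
--         "compare",
--         "verify",
--         "findOne",
--         "find_one",
--         "get_user",
--     ]
--     return any(indicator.lower() in content.lower() for indicator in indicators)
-- ===== SOURCE B (Python) =====
-- def check_authentication(content: str) -> bool:
--     """Check if authentication logic is present (index-driven position scan)."""
--     keywords = ("bcrypt", "hash", "compare", "verify", "findone", "find_one", "get_user")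
--     low = content.lower()
--     n = len(low)
--     i = 0
--     while i < n:
--         for k in keywords:
--             if low.startswith(k, i):
--                 return True
--         i += 1
--     return False
-- ===== Notes on version B (the rewrite author's own statement) =====
-- stated objective: alternative
-- what changed: B lowercases the content once and walks positions left-to-right with an explicit index, returning True as soon as some keyword starts at the current position, instead of A's seven independent substring-membership tests each re-lowercasing the content.
import Mathlib
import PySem

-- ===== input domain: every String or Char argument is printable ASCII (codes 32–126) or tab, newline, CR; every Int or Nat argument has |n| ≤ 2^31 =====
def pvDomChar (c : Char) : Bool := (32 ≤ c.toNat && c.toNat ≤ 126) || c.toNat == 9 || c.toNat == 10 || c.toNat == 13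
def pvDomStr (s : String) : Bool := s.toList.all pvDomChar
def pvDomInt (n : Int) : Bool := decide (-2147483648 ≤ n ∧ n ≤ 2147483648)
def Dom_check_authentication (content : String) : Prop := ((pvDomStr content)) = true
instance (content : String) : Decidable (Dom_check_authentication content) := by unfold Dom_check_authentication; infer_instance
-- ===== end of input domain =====

-- B lowercases the content once and walks positions left-to-right with an explicit index,
-- returning true as soon as some keyword starts at the current position (alternative, same cost).

-- ===== PORT A =====
def check_authentication (content : String) : Bool :=
  let indicators : List String :=
    ["bcrypt", "hash", "compare", "verify", "findOne", "find_one", "get_user"]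
  indicators.any (fun indicator =>
    PySem.Str.isIn (PySem.Str.lower indicator) (PySem.Str.lower content))

-- ===== PORT B =====
-- the while loop over positions i < n becomes recursion on the index i (measure n - i);
-- low.startswith(k, i) is exactly a prefix test of k on the i-dropped character list.
def pvScan (keywords : List String) (low : List Char) (i : Nat) : Bool :=
  if i < low.length then
    if keywords.any (fun k => PySem.Chars.startswith (low.drop i) k.toList) then
      true
    else
      pvScan keywords low (i + 1)
  else
    false
termination_by low.length - i

def check_authentication_alt (content : String) : Bool :=
  let keywords : List String :=
    ["bcrypt", "hash", "compare", "verify", "findone", "find_one", "get_user"]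
  let low := PySem.Str.lower content
  pvScan keywords low.toList 0

-- ===== PRECONDITION & SPEC =====
def Spec_check_authentication (content : String) (out : Bool) : Prop := out = check_authentication_alt content
instance (content : String) (out : Bool) : Decidable (Spec_check_authentication content out) := by unfold Spec_check_authentication; infer_instance

-- ===== CLAIM (what is proved, stated in full; the proofs are below) =====
def Claim_equal_check_authentication : Prop := ∀ (content : String), Dom_check_authentication content → Spec_check_authentication content (check_authentication content)

-- ===== LEMMAS AND PROOFS =====

-- the scan from position i succeeds iff some keyword starts at some position j ≥ i
-- (keywords nonempty, so a match forces j < low.length)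
lemma pvScan_iff (keywords : List String) (hk : ∀ k ∈ keywords, k.toList ≠ [])
    (low : List Char) (i : Nat) :
    pvScan keywords low i = true ↔
      ∃ j, i ≤ j ∧ (keywords.any fun k => PySem.Chars.startswith (low.drop j) k.toList) = true := by
  induction i using pvScan.induct keywords low with
  | case1 i hlt hmatch =>
    rw [pvScan]
    simp only [if_pos hlt, if_pos hmatch]
    exact ⟨fun _ => ⟨i, le_refl _, hmatch⟩, fun _ => trivial⟩
  | case2 i hlt hmatch ih =>
    rw [pvScan]
    simp only [if_pos hlt, if_neg hmatch, ih]
    constructor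
    · rintro ⟨j, hij, hj⟩; exact ⟨j, Nat.le_of_succ_le hij, hj⟩
    · rintro ⟨j, hij, hj⟩
      refine ⟨j, ?_, hj⟩
      rcases Nat.lt_or_ge i j with h | h
      · exact h
      · exfalso; have : j = i := Nat.le_antisymm (by omega) (by omega)
        subst this; exact hmatch hj
  | case3 i hlt =>
    rw [pvScan]
    simp only [if_neg hlt]
    constructor
    · intro h; cases h
    · rintro ⟨j, _, hj⟩
      rw [List.any_eq_true] at hj
      obtain ⟨k, hkm, hks⟩ := hj
      rw [PySem.Chars.startswith_iff] at hks
      have hdrop : low.drop j = [] := List.drop_eq_nil_of_le (by omega)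
      rw [hdrop] at hks
      exact absurd (List.prefix_nil.mp hks) (hk k hkm)

-- "sub in s" equals "sub starts at some position j ≥ 0"
lemma pv_isIn_iff (sub s : List Char) :
    PySem.Chars.isIn sub s = true ↔
      ∃ j : Nat, 0 ≤ j ∧ PySem.Chars.startswith (s.drop j) sub = true := by
  rw [← PySem.Chars.exists_prefix_drop_iff_isIn]
  constructor
  · rintro ⟨j, hj⟩; exact ⟨j, Nat.zero_le _, (PySem.Chars.startswith_iff _ _).mpr hj⟩
  · rintro ⟨j, _, hj⟩; exact ⟨j, (PySem.Chars.startswith_iff _ _).mp hj⟩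

-- ===== VERDICT (by name: the statement is the Claim_ definition above) =====
theorem check_authentication_spec : Claim_equal_check_authentication := by
  intro content _
  unfold Spec_check_authentication check_authentication check_authentication_alt
  rw [Bool.eq_iff_iff]
  rw [pvScan_iff _ (by decide) _ 0]
  simp only [List.any_cons, List.any_nil, Bool.or_eq_true, PySem.Str.isIn_eq, pv_isIn_iff,
    PySem.Str.toList_lower,
    show ("bcrypt" : String).toList = ['b','c','r','y','p','t'] from by decide,
    show ("hash" : String).toList = ['h','a','s','h'] from by decide,
    show ("compare" : String).toList = ['c','o','m','p','a','r','e'] from by decide,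
    show ("verify" : String).toList = ['v','e','r','i','f','y'] from by decide,
    show ("findone" : String).toList = ['f','i','n','d','o','n','e'] from by decide,
    show ("find_one" : String).toList = ['f','i','n','d','_','o','n','e'] from by decide,
    show ("get_user" : String).toList = ['g','e','t','_','u','s','e','r'] from by decide,
    show ("findOne" : String).toList = ['f','i','n','d','O','n','e'] from by decide,
    show PySem.Chars.lower ['f','i','n','d','O','n','e'] = ['f','i','n','d','o','n','e'] from by decide,
    show PySem.Chars.lower ['b','c','r','y','p','t'] = ['b','c','r','y','p','t'] from by decide,
    show PySem.Chars.lower ['h','a','s','h'] = ['h','a','s','h'] from by decide,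
    show PySem.Chars.lower ['c','o','m','p','a','r','e'] = ['c','o','m','p','a','r','e'] from by decide,
    show PySem.Chars.lower ['v','e','r','i','f','y'] = ['v','e','r','i','f','y'] from by decide,
    show PySem.Chars.lower ['f','i','n','d','_','o','n','e'] = ['f','i','n','d','_','o','n','e'] from by decide,
    show PySem.Chars.lower ['g','e','t','_','u','s','e','r'] = ['g','e','t','_','u','s','e','r'] from by decide]
  constructor
  · rintro (⟨j, h0, hj⟩ | ⟨j, h0, hj⟩ | ⟨j, h0, hj⟩ | ⟨j, h0, hj⟩ | ⟨j, h0, hj⟩ | ⟨j, h0, hj⟩ | ⟨j, h0, hj⟩ | h)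
    · exact ⟨j, Nat.zero_le _, by simp [hj]⟩
    · exact ⟨j, Nat.zero_le _, by simp [hj]⟩
    · exact ⟨j, Nat.zero_le _, by simp [hj]⟩
    · exact ⟨j, Nat.zero_le _, by simp [hj]⟩
    · exact ⟨j, Nat.zero_le _, by simp [hj]⟩
    · exact ⟨j, Nat.zero_le _, by simp [hj]⟩
    · exact ⟨j, Nat.zero_le _, by simp [hj]⟩
    · cases h
  · rintro ⟨j, -, hj⟩
    rcases hj with (h | h | h | h | h | h | h | h)
    · exact Or.inl ⟨j, Nat.zero_le _, h⟩
    · exact Or.inr (Or.inl ⟨j, Nat.zero_le _, h⟩)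
    · exact Or.inr (Or.inr (Or.inl ⟨j, Nat.zero_le _, h⟩))
    · exact Or.inr (Or.inr (Or.inr (Or.inl ⟨j, Nat.zero_le _, h⟩)))
    · exact Or.inr (Or.inr (Or.inr (Or.inr (Or.inl ⟨j, Nat.zero_le _, h⟩))))
    · exact Or.inr (Or.inr (Or.inr (Or.inr (Or.inr (Or.inl ⟨j, Nat.zero_le _, h⟩)))))
    · exact Or.inr (Or.inr (Or.inr (Or.inr (Or.inr (Or.inr (Or.inl ⟨j, Nat.zero_le _, h⟩))))))
    · cases h
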